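-- pv_equiv track=rewrite | github.com/weihao-bo/ViLoMem | src/common/verification.py | _resolve_option_from_answer
-- ===== SOURCE A (Python) =====
-- from typing import Any, Dict, Tuple
--
-- def _normalize_choice_key(choice: Any) -> str:
--     return str(choice).strip().upper()
--
-- def _resolve_option_from_answer(
--     answer: Any, choices: dict[str, Any]
-- ) -> str | None:
--     """Map a parsed answer (letter or text) back to a choice option."""
--
--     if not isinstance(answer, str):
--         return None
--
--     normalized = _normalize_choice_key(answer)
--     for option in choices.keys():
--         if normalized == _normalize_choice_key(option):
--             return str(option)
--
--     normalized_text = answer.strip().lower()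
--     for option, value in choices.items():
--         if isinstance(value, str) and value.strip().lower() == normalized_text:
--             return str(option)
--
--     return None
-- ===== SOURCE B (Python) =====
-- def _resolve_option_from_answer(answer, choices):
--     """Map a parsed answer (letter or text) back to a choice option."""
--     if not isinstance(answer, str):
--         return None
--     norm_key = answer.strip().upper()
--     norm_text = answer.strip().lower()
--     fallback = None
--     for option, value in choices.items():
--         if norm_key == str(option).strip().upper():
--             return str(option)
--         if fallback is None and isinstance(value, str) and value.strip().lower() == norm_text:
--             fallback = str(option)
--     return fallback
-- ===== Notes on version B (the rewrite author's own statement) =====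
-- stated objective: simpler
-- what changed: Replaces A's two sequential scans over choices with a single pass that returns on a key match and records the first value match as a fallback returned after the loop.
import Mathlib
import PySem

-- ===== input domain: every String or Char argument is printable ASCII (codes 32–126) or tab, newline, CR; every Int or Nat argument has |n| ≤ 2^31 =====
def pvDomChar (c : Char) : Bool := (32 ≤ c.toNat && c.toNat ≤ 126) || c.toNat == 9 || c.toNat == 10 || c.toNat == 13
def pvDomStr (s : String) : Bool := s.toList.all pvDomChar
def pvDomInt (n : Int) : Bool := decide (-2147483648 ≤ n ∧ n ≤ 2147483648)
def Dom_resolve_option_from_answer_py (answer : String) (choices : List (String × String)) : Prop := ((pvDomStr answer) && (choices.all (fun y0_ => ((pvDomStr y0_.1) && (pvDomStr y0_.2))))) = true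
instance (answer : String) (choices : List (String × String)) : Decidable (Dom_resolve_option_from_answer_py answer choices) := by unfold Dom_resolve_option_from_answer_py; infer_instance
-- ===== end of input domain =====

-- ===== PORT A =====
-- B changes: one pass with a recorded fallback instead of A's two sequential scans (objective: simpler).
-- helper for A's first loop: 'for option in choices.keys(): if normalized == normalize(option): return str(option)'
def pvKeyScan (nk : String) : List (String × String) → Option String
  | [] => none
  | (o, _) :: rest =>
    if nk == PySem.Str.upper (PySem.Str.strip o) then some o else pvKeyScan nk rest

-- helper for A's second loop: 'for option, value in choices.items(): if value.strip().lower() == normalized_text: return str(option)'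
def pvValScan (nt : String) : List (String × String) → Option String
  | [] => none
  | (o, v) :: rest =>
    if PySem.Str.lower (PySem.Str.strip v) == nt then some o else pvValScan nt rest

def resolve_option_from_answer_py (answer : String) (choices : List (String × String)) : Option String :=
  let normalized := PySem.Str.upper (PySem.Str.strip answer)
  match pvKeyScan normalized choices with
  | some o => some o
  | none =>
    let normalized_text := PySem.Str.lower (PySem.Str.strip answer)
    match pvValScan normalized_text choices with
    | some o => some o
    | none => none

-- ===== PORT B =====
-- B's single loop: return on a key match, record the first value match in 'fb', return 'fb' after the loop
def pvAltScan (nk nt : String) : List (String × String) → Option String → Option String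
  | [], fb => fb
  | (o, v) :: rest, fb =>
    if nk == PySem.Str.upper (PySem.Str.strip o) then some o
    else if fb.isNone && (PySem.Str.lower (PySem.Str.strip v) == nt) then pvAltScan nk nt rest (some o)
    else pvAltScan nk nt rest fb

def resolve_option_from_answer_py_alt (answer : String) (choices : List (String × String)) : Option String :=
  pvAltScan (PySem.Str.upper (PySem.Str.strip answer)) (PySem.Str.lower (PySem.Str.strip answer)) choices none

-- ===== PRECONDITION & SPEC =====
def Spec_resolve_option_from_answer_py (answer : String) (choices : List (String × String)) (out : Option String) : Prop := out = resolve_option_from_answer_py_alt answer choices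
instance (answer : String) (choices : List (String × String)) (out : Option String) : Decidable (Spec_resolve_option_from_answer_py answer choices out) := by unfold Spec_resolve_option_from_answer_py; infer_instance

-- ===== CLAIM =====
def Claim_equal_resolve_option_from_answer_py : Prop := ∀ (answer : String) (choices : List (String × String)), Dom_resolve_option_from_answer_py answer choices → Spec_resolve_option_from_answer_py answer choices (resolve_option_from_answer_py answer choices)

-- ===== LEMMAS AND PROOFS =====
theorem pvAltScan_eq (nk nt : String) (l : List (String × String)) :
    ∀ fb : Option String,
      pvAltScan nk nt l fb =
        match pvKeyScan nk l with
        | some o => some o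
        | none => match fb with
          | some f => some f
          | none => pvValScan nt l := by
  induction l with
  | nil => intro fb; cases fb <;> rfl
  | cons hd tl ih =>
    intro fb
    obtain ⟨o, v⟩ := hd
    by_cases hk : (nk == PySem.Str.upper (PySem.Str.strip o)) = true
    · simp [pvAltScan, pvKeyScan, hk]
    · cases fb with
      | some f => simp [pvAltScan, pvKeyScan, hk, ih]
      | none =>
        by_cases hv : (PySem.Str.lower (PySem.Str.strip v) == nt) = true
        · simp [pvAltScan, pvKeyScan, pvValScan, hk, hv, ih]
        · simp [pvAltScan, pvKeyScan, pvValScan, hk, hv, ih]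

-- ===== VERDICT =====
theorem resolve_option_from_answer_py_spec : Claim_equal_resolve_option_from_answer_py := by
  intro answer choices _
  unfold Spec_resolve_option_from_answer_py resolve_option_from_answer_py resolve_option_from_answer_py_alt
  rw [pvAltScan_eq]
  cases hk : pvKeyScan (PySem.Str.upper (PySem.Str.strip answer)) choices <;> simp [hk]
  cases pvValScan (PySem.Str.lower (PySem.Str.strip answer)) choices <;> simp
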